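-- pv_equiv track=rewrite | github.com/dyshleva/pb-homework | midterm_prep/numbersequence.py | narayana_sequence
-- ===== SOURCE A (Python) =====
-- from typing import List
--
-- def check_for_speciality(i: int) -> bool:
--     """
--     Check number for narayana as shown in
--     Args:
--         i: int
--     Returns:
--         bool: whether speciality condition is met
--     """
--     bin_rep = list(reversed([int(x) for x in bin(i)[2:]]))
--     bin_rep = bin_rep[:2] + bin_rep[3:]
--     return sum(bin_rep) % 2 == 0
--
-- def narayana_sequence(i: int) -> List[int]:
--     """
--     Return first i special narayana sequence numbers
--     Special here being that the number has an even number of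
--     1 bits in its binary representation, excluding the third bit
--
--     Args:
--         i - list length
--     Reutnrs:
--         list of special narayana numbers
--     """
--
--     lst = [1, 1, 1]
--     j = 3
--     while True:
--         narayana = lst[j - 1] + lst[j - 3]
--         lst.append(narayana)
--         j += 1
--         if len(list(filter(check_for_speciality, lst))) == i:
--             return list(filter(check_for_speciality, lst))
-- ===== SOURCE B (Python) =====
-- from typing import List
--
--
-- def _is_special(n: int) -> bool:
--     # even number of 1 bits, not counting bit 2 (the 4s bit)
--     ones = bin(n).count("1") - ((n >> 2) & 1)
--     return ones % 2 == 0
--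
--
-- def narayana_sequence(i: int) -> List[int]:
--     out = []
--     a = b = c = 1
--     for t in (a, b, c):
--         if _is_special(t):
--             out.append(t)
--     while len(out) < i:
--         a, b, c = b, c, c + a
--         if _is_special(c):
--             out.append(c)
--     return out
-- ===== Notes on version B (the rewrite author's own statement) =====
-- stated objective: faster
-- what changed: B generates each Narayana term once and tests only the newly generated term (popcount minus bit 2), keeping a running list of the specials found, instead of re-filtering the entire growing list with a per-element string/bit decomposition after every append.
import Mathlib
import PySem

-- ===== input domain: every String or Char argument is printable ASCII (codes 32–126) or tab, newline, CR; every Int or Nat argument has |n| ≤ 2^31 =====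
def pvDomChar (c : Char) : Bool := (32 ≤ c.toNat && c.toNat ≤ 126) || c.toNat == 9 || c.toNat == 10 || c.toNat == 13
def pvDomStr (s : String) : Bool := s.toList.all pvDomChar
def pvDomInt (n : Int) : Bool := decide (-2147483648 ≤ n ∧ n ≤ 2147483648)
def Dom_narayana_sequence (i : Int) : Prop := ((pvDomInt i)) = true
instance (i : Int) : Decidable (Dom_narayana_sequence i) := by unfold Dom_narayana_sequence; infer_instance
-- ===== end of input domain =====

-- B tests only the newly generated Narayana term and keeps a running list of specials, instead of
-- re-filtering the whole growing list after every append (fewer speciality tests per term).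
-- Both while-loops are ported with an explicit fuel parameter ((i.toNat+4)*64) as a totality guard.

-- ===== PORT A =====
-- helper for check_for_speciality: big-endian binary digits, i.e. [int(x) for x in bin(t)[2:]];
-- exact for t ≥ 1 (every number A tests is a Narayana term, hence ≥ 1)
def pvBinDigits (n : Nat) : List Int :=
  if h : n = 0 then [] else pvBinDigits (n / 2) ++ [((n % 2 : Nat) : Int)]
decreasing_by exact Nat.div_lt_self (Nat.pos_of_ne_zero h) one_lt_two

def check_for_speciality (t : Int) : Bool :=
  -- bin_rep = list(reversed([int(x) for x in bin(i)[2:]]))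
  let binRep : List Int := (pvBinDigits t.toNat).reverse
  -- bin_rep = bin_rep[:2] + bin_rep[3:]
  let binRep2 := PySem.List.slice binRep none (some 2) ++ PySem.List.slice binRep (some 3) none
  -- return sum(bin_rep) % 2 == 0
  PySem.Int.mod binRep2.sum 2 == 0

-- the `while True` loop of A; fuel 0 is the totality guard and returns the current filtered list
def loopA (i : Int) : List Int → Int → Nat → List Int
  | lst, _, 0 => lst.filter check_for_speciality
  | lst, j, fuel + 1 =>
    -- narayana = lst[j - 1] + lst[j - 3]   (always in range: j = len(lst) ≥ 3)
    let narayana := PySem.List.pyGetD lst (j - 1) 0 + PySem.List.pyGetD lst (j - 3) 0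
    let lst' := lst ++ [narayana]
    let j' := j + 1
    if ((lst'.filter check_for_speciality).length : Int) = i
    then lst'.filter check_for_speciality
    else loopA i lst' j' fuel

def narayana_sequence (i : Int) : List Int := loopA i [1, 1, 1] 3 ((i.toNat + 4) * 64)

-- ===== PORT B =====
def pvIsSpecial (n : Int) : Bool :=
  -- ones = bin(n).count("1") - ((n >> 2) & 1)   (bitCount = bin(n).count("1"), exact for n ≥ 0)
  let ones : Int := (PySem.Int.bitCount n : Int) - PySem.Int.band (n >>> (2 : Nat)) 1
  PySem.Int.mod ones 2 == 0

-- the `while len(out) < i` loop of B; fuel 0 is the totality guard and returns the specials so far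
def loopB (i : Int) : Int → Int → Int → List Int → Nat → List Int
  | _, _, _, out, 0 => out
  | a, _b, c, out, fuel + 1 =>
    if PySem.List.len out < i then
      let c' := c + a
      let out' := if pvIsSpecial c' then out ++ [c'] else out
      loopB i _b c c' out' fuel
    else out

def narayana_sequence_alt (i : Int) : List Int :=
  let out0 := [(1 : Int), 1, 1].foldl (fun out t => if pvIsSpecial t then out ++ [t] else out) []
  loopB i 1 1 1 out0 ((i.toNat + 4) * 64)

-- ===== PRECONDITION & SPEC =====
-- Pre_ excludes negative i, on which A's while-loop never terminates (the count of specials is a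
-- never-decreasing nonnegative quantity, so it can never equal a negative i); A returns on exactly
-- the admitted inputs.
def Pre_narayana_sequence (i : Int) : Prop := 0 ≤ i
instance (i : Int) : Decidable (Pre_narayana_sequence i) := by unfold Pre_narayana_sequence; infer_instance
def pvWitness_narayana_sequence : Int := (5)

def Spec_narayana_sequence (i : Int) (out : List Int) : Prop := out = narayana_sequence_alt i
instance (i : Int) (out : List Int) : Decidable (Spec_narayana_sequence i out) := by unfold Spec_narayana_sequence; infer_instance

-- ===== CLAIM (what is proved, stated in full; the proofs are below) =====
def Claim_equal_narayana_sequence : Prop := ∀ (i : Int), Dom_narayana_sequence i → Pre_narayana_sequence i → Spec_narayana_sequence i (narayana_sequence i)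

-- ===== LEMMAS AND PROOFS =====

-- little-endian binary digits (proof-side helper)
def pvBitsLE (n : Nat) : List Int :=
  if h : n = 0 then [] else ((n % 2 : Nat) : Int) :: pvBitsLE (n / 2)
decreasing_by exact Nat.div_lt_self (Nat.pos_of_ne_zero h) one_lt_two

theorem pvBinDigits_reverse (n : Nat) : (pvBinDigits n).reverse = pvBitsLE n := by
  induction n using Nat.strong_induction_on with
  | _ n ih =>
    rw [pvBinDigits, pvBitsLE]
    by_cases h : n = 0
    · simp [h]
    · simp only [h, dif_neg, not_false_iff, List.reverse_append, List.reverse_cons,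
        List.reverse_nil, List.nil_append, List.singleton_append]
      rw [ih (n / 2) (Nat.div_lt_self (Nat.pos_of_ne_zero h) one_lt_two)]

theorem pvBitsLE_sum (n : Nat) : (pvBitsLE n).sum = (PySem.Int.bitCount (n : Int) : Int) := by
  induction n using Nat.strong_induction_on with
  | _ n ih =>
    rw [pvBitsLE]
    by_cases h : n = 0
    · simp [h]
    · simp only [h, dif_neg, not_false_iff, List.sum_cons]
      rw [ih (n / 2) (Nat.div_lt_self (Nat.pos_of_ne_zero h) one_lt_two),
        PySem.Int.bitCount_natCast (Nat.pos_of_ne_zero h)]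
      push_cast
      ring

theorem pvBitsLE_getD_succ (n : Nat) (k : Nat) :
    (pvBitsLE n).getD (k + 1) 0 = (pvBitsLE (n / 2)).getD k 0 := by
  by_cases h : n = 0
  · subst h; simp [pvBitsLE]
  · rw [pvBitsLE, dif_neg h]; rfl

theorem pvBitsLE_getD_zero (n : Nat) : (pvBitsLE n).getD 0 0 = ((n % 2 : Nat) : Int) := by
  by_cases h : n = 0
  · subst h; simp [pvBitsLE]
  · rw [pvBitsLE, dif_neg h]; rfl

theorem pvBitsLE_getD_two (n : Nat) : (pvBitsLE n).getD 2 0 = ((n / 4 % 2 : Nat) : Int) := by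
  have : (2 : Nat) = 1 + 1 := rfl
  rw [this, pvBitsLE_getD_succ, pvBitsLE_getD_succ, pvBitsLE_getD_zero,
    Nat.div_div_eq_div_mul]

theorem pv_take_drop_sum (L : List Int) :
    ((L.take 2 ++ L.drop 3).sum) = L.sum - L.getD 2 0 := by
  match L with
  | [] => simp
  | [a] => simp
  | [a, b] => simp
  | a :: b :: c :: rest => simp [List.getD]; ring

-- the two speciality tests agree on every nonnegative argument
theorem pv_sp_eq (t : Int) (ht : 0 ≤ t) : check_for_speciality t = pvIsSpecial t := by
  lift t to Nat using ht with n
  unfold check_for_speciality pvIsSpecial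
  dsimp only
  rw [Int.toNat_natCast, pvBinDigits_reverse,
    PySem.List.slice_to _ (by norm_num), PySem.List.slice_from _ (by norm_num)]
  have h2 : ((2 : Int).toNat) = 2 := rfl
  have h3 : ((3 : Int).toNat) = 3 := rfl
  rw [h2, h3]
  rw [pv_take_drop_sum, pvBitsLE_sum, pvBitsLE_getD_two]
  have hsh : ((n : Int) >>> (2 : Nat)) = ((n / 4 : Nat) : Int) := by
    rw [← Int.natCast_shiftRight, Nat.shiftRight_eq_div_pow]
  have hm : PySem.Int.mod ((n / 4 : Nat) : Int) 2 = ((n / 4 % 2 : Nat) : Int) := by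
    exact_mod_cast PySem.Int.mod_natCast (n / 4) 2
  rw [hsh, PySem.Int.band_one, hm]

theorem loopB_done (i : Int) (a b c : Int) (out : List Int) (fuel : Nat)
    (h : i ≤ (out.length : Int)) : loopB i a b c out fuel = out := by
  cases fuel with
  | zero => rfl
  | succ n => rw [loopB, PySem.List.len_eq, if_neg (by omega)]

-- loop invariant: A's list is pre ++ [a,b,c] (all terms ≥ 1), j is its length, and B's running
-- list `out` is exactly A's current filtered list, still shorter than i
theorem pv_loop_eq (i : Int) (fuel : Nat) : ∀ (pre : List Int) (a b c : Int) (out : List Int) (j : Int),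
    (∀ x ∈ pre ++ [a, b, c], 1 ≤ x) →
    j = ((pre ++ [a, b, c]).length : Int) →
    out = (pre ++ [a, b, c]).filter check_for_speciality →
    ((out.length : Int) < i) →
    loopA i (pre ++ [a, b, c]) j fuel = loopB i a b c out fuel := by
  induction fuel with
  | zero => intro pre a b c out j _ _ hout _; rw [loopA, loopB, hout]
  | succ n ih =>
    intro pre a b c out j hpos hj hout hlt
    have hlen : (pre ++ [a, b, c]).length = pre.length + 3 := by simp
    have hj1 : j - 1 = ((pre.length + 2 : Nat) : Int) := by rw [hj, hlen]; push_cast; ring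
    have hj3 : j - 3 = ((pre.length : Nat) : Int) := by rw [hj, hlen]; push_cast; ring
    have hg1 : PySem.List.pyGetD (pre ++ [a, b, c]) (j - 1) 0 = c := by
      rw [hj1, PySem.List.pyGetD_natCast]
      rw [List.getD_eq_getElem?_getD, List.getElem?_append_right (by omega)]
      simp
    have hg3 : PySem.List.pyGetD (pre ++ [a, b, c]) (j - 3) 0 = a := by
      rw [hj3, PySem.List.pyGetD_natCast]
      rw [List.getD_eq_getElem?_getD, List.getElem?_append_right (by omega)]
      simp
    have ht : (1 : Int) ≤ c + a := by
      have ha := hpos a (by simp); have hc := hpos c (by simp); omega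
    have hspt : pvIsSpecial (c + a) = check_for_speciality (c + a) :=
      (pv_sp_eq _ (by omega)).symm
    have hfilt : (pre ++ [a, b, c] ++ [c + a]).filter check_for_speciality
        = out ++ (if check_for_speciality (c + a) then [c + a] else []) := by
      rw [List.filter_append (l₁ := pre ++ [a, b, c]), ← hout]
      congr 1
      by_cases h : check_for_speciality (c + a) <;> simp [h]
    have hassoc : pre ++ [a, b, c] ++ [c + a] = (pre ++ [a]) ++ [b, c, c + a] := by simp
    have hpos' : ∀ x ∈ (pre ++ [a]) ++ [b, c, c + a], 1 ≤ x := by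
      intro x hx
      rw [← hassoc] at hx
      rcases List.mem_append.mp hx with h | h
      · exact hpos x h
      · simp at h; rcases h with rfl; omega
    have hB : loopB i a b c out (n + 1)
        = loopB i b c (c + a) (out ++ (if check_for_speciality (c + a) then [c + a] else [])) n := by
      rw [loopB, PySem.List.len_eq, if_pos (by exact_mod_cast hlt)]
      dsimp only
      rw [hspt]
      by_cases h : check_for_speciality (c + a) <;> simp [h]
    have hA : loopA i (pre ++ [a, b, c]) j (n + 1)
        = (if (((out ++ (if check_for_speciality (c + a) then [c + a] else [])).length : Int) = i)
           then out ++ (if check_for_speciality (c + a) then [c + a] else [])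
           else loopA i ((pre ++ [a]) ++ [b, c, c + a]) (j + 1) n) := by
      rw [loopA]
      rw [hg1, hg3, hfilt, hassoc]
    rw [hA, hB]
    by_cases hsp : check_for_speciality (c + a)
    · rw [if_pos hsp]
      by_cases heq : ((out.length : Int) + 1) = i
      · rw [if_pos (by simp; omega)]
        exact (loopB_done _ _ _ _ _ _ (by simp; omega)).symm
      · rw [if_neg (by simp; omega)]
        exact ih (pre ++ [a]) b c (c + a) (out ++ [c + a]) (j + 1) hpos'
          (by rw [hj]; simp; push_cast; ring)
          (by rw [← hassoc, hfilt, if_pos hsp])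
          (by simp; omega)
    · rw [if_neg hsp]
      simp only [List.append_nil]
      rw [if_neg (by omega)]
      exact ih (pre ++ [a]) b c (c + a) out (j + 1) hpos'
        (by rw [hj]; simp; push_cast; ring)
        (by rw [← hassoc, hfilt, if_neg hsp, List.append_nil])
        hlt

theorem pv_check_one : check_for_speciality 1 = false := by
  rw [pv_sp_eq 1 (by norm_num)]; decide

theorem pv_check_two : check_for_speciality 2 = false := by
  rw [pv_sp_eq 2 (by norm_num)]; decide

theorem pv_filter_init : [(1 : Int), 1, 1].filter check_for_speciality = [] := by
  simp [List.filter, pv_check_one]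

theorem pv_alt_zero : narayana_sequence_alt 0 = [] := by decide

theorem pv_a_zero : narayana_sequence 0 = [] := by
  have e : narayana_sequence 0 = loopA 0 [1, 1, 1] 3 (255 + 1) := rfl
  rw [e, loopA]
  have hg : PySem.List.pyGetD [(1 : Int), 1, 1] (3 - 1) 0 + PySem.List.pyGetD [(1 : Int), 1, 1] (3 - 3) 0 = 2 := by decide
  rw [hg]
  have hf : List.filter check_for_speciality ([(1 : Int), 1, 1] ++ [2]) = [] := by
    simp [List.filter, pv_check_one, pv_check_two]
  rw [hf]
  simp

-- ===== VERDICT (by name: the statement is the Claim_ definition above) =====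
theorem narayana_sequence_spec : Claim_equal_narayana_sequence := by
  intro i _ hpre
  unfold Pre_narayana_sequence at hpre
  unfold Spec_narayana_sequence
  rcases lt_or_eq_of_le hpre with hi | h0
  · have hB : narayana_sequence_alt i = loopB i 1 1 1 [] ((i.toNat + 4) * 64) := by
      unfold narayana_sequence_alt
      norm_num [List.foldl, show pvIsSpecial 1 = false from by decide]
    have hA : narayana_sequence i = loopA i ([] ++ [1, 1, 1]) 3 ((i.toNat + 4) * 64) := rfl
    rw [hA, hB]
    exact pv_loop_eq i ((i.toNat + 4) * 64) [] 1 1 1 [] 3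
      (by intro x hx; simp at hx; rcases hx with rfl | rfl | rfl <;> norm_num)
      (by simp)
      (by rw [List.nil_append, pv_filter_init])
      (by simpa using hi)
  · rw [← h0, pv_a_zero, pv_alt_zero]
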